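-- pv_equiv track=rewrite | github.com/redyeti/startseite | dateHelpers/__init__.py | parseDurationParts
-- ===== SOURCE A (Python) =====
-- def parseDurationParts(value, unit):
-- 	if unit in set(("second","seconds","s")):
-- 		return value
-- 	elif unit in set(("minute","minutes","min","m")):
-- 		return parseDurationParts(value*60, "s")
-- 	elif unit in set(("hour","hours","h")):
-- 		return parseDurationParts(value*60, "m")
-- 	elif unit in set(("day","days","d")):
-- 		return parseDurationParts(value*24, "h")
-- 	elif unit in set(("week","weeks","w")):
-- 		return parseDurationParts(value*7, "d")
-- 	elif unit in set(("month","months","M")):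
-- 		return parseDurationParts(value*30, "d")
-- 	elif unit in set(("year","years","y","a")):
-- 		return parseDurationParts(value*365, "d")
-- 	else:
-- 		raise ValueError("Invalid unit: "+unit)
-- ===== SOURCE B (Python) =====
-- _SECONDS = ("second", "seconds", "s")
--
-- _STEP = {
-- 	"minute": (60, "s"), "minutes": (60, "s"), "min": (60, "s"), "m": (60, "s"),
-- 	"hour": (60, "m"), "hours": (60, "m"), "h": (60, "m"),
-- 	"day": (24, "h"), "days": (24, "h"), "d": (24, "h"),
-- 	"week": (7, "d"), "weeks": (7, "d"), "w": (7, "d"),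
-- 	"month": (30, "d"), "months": (30, "d"), "M": (30, "d"),
-- 	"year": (365, "d"), "years": (365, "d"), "y": (365, "d"), "a": (365, "d"),
-- }
--
-- def parseDurationParts(value, unit):
-- 	while unit not in _SECONDS:
-- 		try:
-- 			factor, unit = _STEP[unit]
-- 		except KeyError:
-- 			raise ValueError("Invalid unit: " + unit)
-- 		value = value * factor
-- 	return value
-- ===== Notes on version B (the rewrite author's own statement) =====
-- stated objective: simpler
-- what changed: Replaced the seven-branch recursion with a table-driven while loop: a dict maps each unit alias to (factor, next_unit) and the loop multiplies stage by stage until a seconds alias is reached.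
import Mathlib
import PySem

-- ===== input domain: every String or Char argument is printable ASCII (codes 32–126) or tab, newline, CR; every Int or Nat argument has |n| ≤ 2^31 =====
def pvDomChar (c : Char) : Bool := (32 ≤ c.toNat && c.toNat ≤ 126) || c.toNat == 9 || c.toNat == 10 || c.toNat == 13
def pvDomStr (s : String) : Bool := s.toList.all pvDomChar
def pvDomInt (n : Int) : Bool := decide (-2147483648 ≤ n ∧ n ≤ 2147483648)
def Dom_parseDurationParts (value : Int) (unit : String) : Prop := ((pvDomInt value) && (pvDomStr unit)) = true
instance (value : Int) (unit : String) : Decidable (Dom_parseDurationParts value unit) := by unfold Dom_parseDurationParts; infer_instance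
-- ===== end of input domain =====

-- B replaces A's seven-branch recursion with a table-driven loop (dict alias -> (factor, next unit)); objective: simpler.


-- ===== PORT A =====
-- A's recursion always reaches "s" in ≤ 5 calls; the fuel argument (5) only makes that
-- recursion structural — it is never exhausted on any input where A returns. The final
-- 'else' branch (Python: raise ValueError) returns 0 and is excluded by Pre_.
def parseDurationPartsGoA : Nat → Int → String → Int
  | 0, _, _ => 0
  | Nat.succ fuel, value, unit =>
    if unit = "second" ∨ unit = "seconds" ∨ unit = "s" then value
    else if unit = "minute" ∨ unit = "minutes" ∨ unit = "min" ∨ unit = "m" then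
      parseDurationPartsGoA fuel (value * 60) "s"
    else if unit = "hour" ∨ unit = "hours" ∨ unit = "h" then
      parseDurationPartsGoA fuel (value * 60) "m"
    else if unit = "day" ∨ unit = "days" ∨ unit = "d" then
      parseDurationPartsGoA fuel (value * 24) "h"
    else if unit = "week" ∨ unit = "weeks" ∨ unit = "w" then
      parseDurationPartsGoA fuel (value * 7) "d"
    else if unit = "month" ∨ unit = "months" ∨ unit = "M" then
      parseDurationPartsGoA fuel (value * 30) "d"
    else if unit = "year" ∨ unit = "years" ∨ unit = "y" ∨ unit = "a" then
      parseDurationPartsGoA fuel (value * 365) "d"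
    else 0

def parseDurationParts (value : Int) (unit : String) : Int :=
  parseDurationPartsGoA 5 value unit

-- ===== PORT B =====
def pvStepTable : PySem.Dict String (Int × String) := PySem.Dict.ofList
  [("minute", (60, "s")), ("minutes", (60, "s")), ("min", (60, "s")), ("m", (60, "s")),
   ("hour", (60, "m")), ("hours", (60, "m")), ("h", (60, "m")),
   ("day", (24, "h")), ("days", (24, "h")), ("d", (24, "h")),
   ("week", (7, "d")), ("weeks", (7, "d")), ("w", (7, "d")),
   ("month", (30, "d")), ("months", (30, "d")), ("M", (30, "d")),
   ("year", (365, "d")), ("years", (365, "d")), ("y", (365, "d")), ("a", (365, "d"))]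

-- B's while loop; fuel (5) only bounds the loop, which reaches a seconds alias in ≤ 5
-- steps whenever it terminates. Table miss (Python: raise ValueError) returns 0, excluded by Pre_.
def parseDurationPartsGoB : Nat → Int → String → Int
  | 0, _, _ => 0
  | Nat.succ fuel, value, unit =>
    if unit = "second" ∨ unit = "seconds" ∨ unit = "s" then value
    else match pvStepTable.get? unit with
      | some (factor, next) => parseDurationPartsGoB fuel (value * factor) next
      | none => 0

def parseDurationParts_alt (value : Int) (unit : String) : Int :=
  parseDurationPartsGoB 5 value unit

-- ===== PRECONDITION & SPEC =====
-- Pre_ excludes exactly the units not among A's recognised aliases, on which A raises ValueError.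
def Pre_parseDurationParts (value : Int) (unit : String) : Prop :=
  unit ∈ ["second", "seconds", "s", "minute", "minutes", "min", "m", "hour", "hours", "h",
          "day", "days", "d", "week", "weeks", "w", "month", "months", "M",
          "year", "years", "y", "a"]
instance (value : Int) (unit : String) : Decidable (Pre_parseDurationParts value unit) := by
  unfold Pre_parseDurationParts; infer_instance

def pvWitness_parseDurationParts : Int × String := (7, "hours")

def Spec_parseDurationParts (value : Int) (unit : String) (out : Int) : Prop := out = parseDurationParts_alt value unit
instance (value : Int) (unit : String) (out : Int) : Decidable (Spec_parseDurationParts value unit out) := by unfold Spec_parseDurationParts; infer_instance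

-- ===== CLAIM (what is proved, stated in full; the proofs are below) =====
def Claim_equal_parseDurationParts : Prop := ∀ (value : Int) (unit : String), Dom_parseDurationParts value unit → Pre_parseDurationParts value unit → Spec_parseDurationParts value unit (parseDurationParts value unit)

-- ===== LEMMAS AND PROOFS =====

-- ===== VERDICT (by name: the statement is the Claim_ definition above) =====
theorem parseDurationParts_spec : Claim_equal_parseDurationParts := by
  intro value unit _ hpre
  unfold Spec_parseDurationParts
  unfold Pre_parseDurationParts at hpre
  fin_cases hpre <;> rfl
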